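-- pv_equiv track=rewrite | github.com/mtlynch/make-mtlynch-stats | app/markdown_table.py | _add_change_formatting
-- ===== SOURCE A (Python) =====
-- def _add_change_formatting(table):
--     rows = []
--     rows.append(table[0])
--     for row in table[1:]:
--         columns = []
--         for i, column in enumerate(row):
--             if i == len(row) - 1:
--                 if column.startswith('-'):
--                     columns.append('<font color="red">%s</font>' % column)
--                 elif column.startswith('+'):
--                     columns.append('<font color="green">%s</font>' % column)
--                 else:
--                     columns.append(column)
--             else:
--                 columns.append(column)
--         rows.append(columns)
--     return rows
-- ===== SOURCE B (Python) =====
-- def _fmt_row(row):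
--     # Recursive over the cells: the cell whose tail is empty is the last column.
--     if not row:
--         return []
--     head, tail = row[0], row[1:]
--     if not tail:
--         if head.startswith('-'):
--             return ['<font color="red">%s</font>' % head]
--         if head.startswith('+'):
--             return ['<font color="green">%s</font>' % head]
--         return [head]
--     return [head] + _fmt_row(tail)
--
--
-- def _fmt_rows(rows):
--     if not rows:
--         return []
--     return [_fmt_row(rows[0])] + _fmt_rows(rows[1:])
--
--
-- def _add_change_formatting(table):
--     return [table[0]] + _fmt_rows(table[1:])
-- ===== Notes on version B (the rewrite author's own statement) =====
-- stated objective: alternative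
-- what changed: Replaces A's iterative accumulator loops with an index-free structural recursion: rows and cells are decomposed head/tail, and the last column is recognised by an empty tail instead of enumerate with an i==len(row)-1 check.
import Mathlib
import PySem

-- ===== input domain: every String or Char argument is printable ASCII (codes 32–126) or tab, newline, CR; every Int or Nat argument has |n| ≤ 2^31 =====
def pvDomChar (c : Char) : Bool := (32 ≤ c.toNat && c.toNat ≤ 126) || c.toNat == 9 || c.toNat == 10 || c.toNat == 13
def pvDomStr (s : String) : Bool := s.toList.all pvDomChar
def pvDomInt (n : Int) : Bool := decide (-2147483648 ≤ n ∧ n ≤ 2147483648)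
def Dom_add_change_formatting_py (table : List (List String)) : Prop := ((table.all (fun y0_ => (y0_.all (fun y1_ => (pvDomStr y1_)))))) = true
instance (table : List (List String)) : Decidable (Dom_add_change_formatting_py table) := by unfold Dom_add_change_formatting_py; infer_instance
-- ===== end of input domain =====

-- B replaces A's iterative accumulator loops (enumerate with an i==len(row)-1 check) by an
-- index-free structural recursion recognising the last column by an empty tail (objective: alternative).

-- ===== PORT A =====
-- inner loop body: for i, column in enumerate(row): ...
def pvRowA (row : List String) : List String :=
  (PySem.List.enumerate row).foldl (fun columns ic =>
    if ic.1 = (row.length : Int) - 1 then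
      if PySem.Str.startswith ic.2 "-" then
        columns ++ ["<font color=\"red\">" ++ ic.2 ++ "</font>"]
      else if PySem.Str.startswith ic.2 "+" then
        columns ++ ["<font color=\"green\">" ++ ic.2 ++ "</font>"]
      else columns ++ [ic.2]
    else columns ++ [ic.2]) []

def add_change_formatting_py (table : List (List String)) : List (List String) :=
  match table with
  | [] => []   -- unreachable under Pre_ (Python raises IndexError on table[0])
  | first :: _ =>
    (PySem.List.slice table (some 1) none).foldl (fun rows row => rows ++ [pvRowA row]) [first]

-- ===== PORT B =====
-- _fmt_row: recursion over the cells; the cell with empty tail is the last column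
def pvFmtRow : List String → List String
  | [] => []
  | [head] =>
    if PySem.Str.startswith head "-" then ["<font color=\"red\">" ++ head ++ "</font>"]
    else if PySem.Str.startswith head "+" then ["<font color=\"green\">" ++ head ++ "</font>"]
    else [head]
  | head :: tail => head :: pvFmtRow tail

-- _fmt_rows: recursion over the rows
def pvFmtRows : List (List String) → List (List String)
  | [] => []
  | r :: rs => pvFmtRow r :: pvFmtRows rs

def add_change_formatting_py_alt (table : List (List String)) : List (List String) :=
  match table with
  | [] => []   -- unreachable under Pre_ (Python raises IndexError on table[0])
  | first :: rest => first :: pvFmtRows rest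

-- ===== PRECONDITION & SPEC =====
-- A raises IndexError on the empty table (table[0]); excluded, B raises there too.
def Pre_add_change_formatting_py (table : List (List String)) : Prop := table ≠ []
instance (table : List (List String)) : Decidable (Pre_add_change_formatting_py table) := by unfold Pre_add_change_formatting_py; infer_instance
def pvWitness_add_change_formatting_py : List (List String) := [["h"], ["-1", "+2"]]

def Spec_add_change_formatting_py (table : List (List String)) (out : List (List String)) : Prop := out = add_change_formatting_py_alt table
instance (table : List (List String)) (out : List (List String)) : Decidable (Spec_add_change_formatting_py table out) := by unfold Spec_add_change_formatting_py; infer_instance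

-- ===== CLAIM (what is proved, stated in full; the proofs are below) =====
def Claim_equal_add_change_formatting_py : Prop := ∀ (table : List (List String)), Dom_add_change_formatting_py table → Pre_add_change_formatting_py table → Spec_add_change_formatting_py table (add_change_formatting_py table)

-- ===== LEMMAS AND PROOFS =====

-- B's recursive row formatter in "dropLast ++ [formatted last]" form
theorem pvFmtRow_eq_split (row : List String) :
    pvFmtRow row = match row.getLast? with
      | none => []
      | some last => row.dropLast ++
          [if PySem.Str.startswith last "-" then "<font color=\"red\">" ++ last ++ "</font>"
           else if PySem.Str.startswith last "+" then "<font color=\"green\">" ++ last ++ "</font>"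
           else last] := by
  induction row with
  | nil => rfl
  | cons head tail ih =>
    cases tail with
    | nil =>
      simp only [pvFmtRow, List.getLast?_singleton, List.dropLast_singleton, List.nil_append]
      split_ifs <;> rfl
    | cons b bs =>
      simp only [pvFmtRow, ih]
      cases h : (b :: bs).getLast? with
      | none => simp at h
      | some last => simp [h]

theorem pvRow_eq (row : List String) : pvRowA row = pvFmtRow row := by
  rw [pvFmtRow_eq_split]
  induction row using List.reverseRecOn with
  | nil => rfl
  | append_singleton xs a _ =>
    unfold pvRowA
    rw [PySem.List.enumerate_append, List.foldl_append]
    rw [PySem.List.foldl_congr_mem (PySem.List.enumerate xs) _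
      (fun acc (ic : Int × String) => acc ++ [ic.2]) []
      (by
        intro acc ic hmem
        rcases (PySem.List.mem_enumerate_iff _ _ _).1 hmem with ⟨k, hk, rfl⟩
        have hne : k ≠ xs.length := by omega
        simp [List.length_append, hne])]
    rw [PySem.List.foldl_append_singleton_eq_map, PySem.List.map_snd_enumerate]
    simp [PySem.List.enumerate, List.length_append]
    split_ifs <;> simp

theorem pvFmtRows_eq_map (rows : List (List String)) : pvFmtRows rows = rows.map pvFmtRow := by
  induction rows with
  | nil => rfl
  | cons r rs ih => simp [pvFmtRows, ih]

-- ===== VERDICT (by name: the statement is the Claim_ definition above) =====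
theorem add_change_formatting_py_spec : Claim_equal_add_change_formatting_py := by
  intro table _ hpre
  match table with
  | [] => exact absurd rfl hpre
  | first :: rest =>
    show add_change_formatting_py (first :: rest) = add_change_formatting_py_alt (first :: rest)
    simp only [add_change_formatting_py, add_change_formatting_py_alt,
      PySem.List.slice_from_one, List.tail_cons, pvFmtRows_eq_map]
    rw [PySem.List.foldl_append_singleton_eq_map]
    simp [pvRow_eq]
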